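-- pv_equiv track=rewrite | github.com/hotriluc/pyth_diploma | untitled/modules/arr_procedures.py | auto_corel_all
-- ===== SOURCE A (Python) =====
-- import copy
--
-- def ShiftRight(aList: list, steps: int):
--     # for negative steps
--     if steps < 0:
--         steps = abs(steps)
--         for i in range(steps):
--             # pop first element
--             # everything is shifted to the left after we pop
--             aList.pop(0)
--             # adding to the end 0
--             aList.append(0)
--     else:
--         for i in range(steps):
--             # insert zero to the 0 position
--             aList.insert(0, 0)
--             # poping last el
--             # everything is shifted to right
--             aList.pop()
--
-- def CyclicShiftRight(aList: list, steps: int):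
--     # for negative steps
--     if steps < 0:
--         steps = abs(steps)
--         for i in range(steps):
--             # adding to the end popped 0th el
--             aList.append(aList.pop(0))
--     else:
--         for i in range(steps):
--             # adding to the beginning popped(last) el
--             aList.insert(0, aList.pop())
--
-- def calculate_correlation_coef(sig1_: list, sig2_: list):
--     R = 0
--     for i in range(0, len(sig1_)):
--         tmp = sig1_[i] * sig2_[i]
--         R += tmp
--     return R
--
-- def getCorellation(source_sig: list, shifted_sig: list, flag: bool = False):
--     # Creating copy of shifted signal to not trasform array from main program(for further usage)
--     # because in Python list contains not val but reference to objects
--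
--     tmp_shifted_sig = copy.deepcopy(shifted_sig)
--
--     correl_list = list()
--     r = calculate_correlation_coef(source_sig, tmp_shifted_sig)
--     correl_list.append(r)
--
--     for i in range(0, len(source_sig)):
--         if flag == False:
--             CyclicShiftRight(tmp_shifted_sig, 1)
--         else:
--             ShiftRight(tmp_shifted_sig, 1)
--
--         r = calculate_correlation_coef(source_sig, tmp_shifted_sig)
--         correl_list.append(r)
--
--     return correl_list
--
-- def auto_corel_all(list_with_signals: list, mode_name):
--     aList = list()
--     sig_num_list = list()
--
--     for item in list_with_signals:
--         if mode_name == "PFAK":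
--             r = getCorellation(item, item)
--         if mode_name == "AFAK":
--             r = getCorellation(item, item, True)
--
--         aList.append(r)
--
--     return aList
-- ===== SOURCE B (Python) =====
-- def auto_corel_all(list_with_signals: list, mode_name):
--     # Direct index-arithmetic autocorrelation: no copies, no shifting, no mutation.
--     if mode_name == "PFAK":
--         return [
--             [sum(sig[i] * sig[(i + len(sig) - k) % len(sig)] for i in range(len(sig)))
--              for k in range(len(sig) + 1)]
--             for sig in list_with_signals
--         ]
--     if mode_name == "AFAK":
--         return [
--             [sum(sig[k + j] * sig[j] for j in range(len(sig) - k))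
--              for k in range(len(sig) + 1)]
--             for sig in list_with_signals
--         ]
--     return []
-- ===== Notes on version B (the rewrite author's own statement) =====
-- stated objective: simpler
-- what changed: Replaced the deepcopy/mutating shift helpers and the maintained shifted buffer with direct index-arithmetic sums (cyclic: sig[i]*sig[(i-k) mod N], linear: sig[k+j]*sig[j]) computed per shift in two comprehensions.
import Mathlib
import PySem

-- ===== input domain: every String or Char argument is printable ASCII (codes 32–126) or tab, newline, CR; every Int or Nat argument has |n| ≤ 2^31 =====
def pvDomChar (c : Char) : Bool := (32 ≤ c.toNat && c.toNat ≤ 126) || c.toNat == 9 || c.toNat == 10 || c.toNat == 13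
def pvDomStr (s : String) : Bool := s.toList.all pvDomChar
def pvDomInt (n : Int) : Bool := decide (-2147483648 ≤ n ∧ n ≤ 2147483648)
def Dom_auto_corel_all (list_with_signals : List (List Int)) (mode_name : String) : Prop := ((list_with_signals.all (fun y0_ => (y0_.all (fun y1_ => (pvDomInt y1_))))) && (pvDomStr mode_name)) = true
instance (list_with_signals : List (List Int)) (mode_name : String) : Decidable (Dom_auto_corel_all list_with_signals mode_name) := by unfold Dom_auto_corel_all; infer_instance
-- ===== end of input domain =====

-- B replaces A's deepcopy-and-shift correlation loops by direct index arithmetic (simpler; return value only — A never mutates its arguments observably since it deep-copies first).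

-- ===== PORT A =====
-- Python mutates lists in place; each helper is ported as the list transformation it performs.
-- pop/insert on the ends; pop(0)/pop() on an empty list never happens in A's call pattern,
-- so the total `headD 0` / `getLast?.getD 0` defaults are unreachable there.
def pvShiftRight (aList : List Int) (steps : Int) : List Int :=
  if steps < 0 then
    (List.range steps.natAbs).foldl (fun l _ => l.tail ++ [0]) aList
  else
    (List.range steps.toNat).foldl (fun l _ => (0 :: l).dropLast) aList

def pvCyclicShiftRight (aList : List Int) (steps : Int) : List Int :=
  if steps < 0 then
    (List.range steps.natAbs).foldl (fun l _ => l.tail ++ [l.headD 0]) aList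
  else
    (List.range steps.toNat).foldl (fun l _ => l.getLast?.getD 0 :: l.dropLast) aList

-- indices are always in range in A's usage (equal-length lists), so `getD _ 0` is exact
def pvCalcCoef (sig1 sig2 : List Int) : Int :=
  (List.range sig1.length).foldl (fun R i => R + sig1.getD i 0 * sig2.getD i 0) 0

def pvGetCorellation (source_sig shifted_sig : List Int) (flag : Bool) : List Int :=
  let tmp := shifted_sig
  ((List.range source_sig.length).foldl
    (fun (st : List Int × List Int) _ =>
      let t := if flag == false then pvCyclicShiftRight st.1 1 else pvShiftRight st.1 1
      (t, st.2 ++ [pvCalcCoef source_sig t]))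
    (tmp, [pvCalcCoef source_sig tmp])).2

-- `r` starts unbound (None here); an unmatched mode on a nonempty list is a NameError in Python,
-- excluded by Pre_ below (the `.getD []` default is unreachable inside Pre_).
def auto_corel_all (list_with_signals : List (List Int)) (mode_name : String) : List (List Int) :=
  ((list_with_signals.foldl
    (fun (st : List (List Int) × Option (List Int)) item =>
      let r := if mode_name == "PFAK" then some (pvGetCorellation item item false) else st.2
      let r := if mode_name == "AFAK" then some (pvGetCorellation item item true) else r
      (st.1 ++ [r.getD []], r))
    ([], none))).1

-- ===== PORT B =====
def pvCorrCyc (sig : List Int) : List Int :=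
  (List.range (sig.length + 1)).map (fun k =>
    (List.range sig.length).foldl
      (fun s i => s + sig.getD i 0 * sig.getD ((i + sig.length - k) % sig.length) 0) 0)

def pvCorrLin (sig : List Int) : List Int :=
  (List.range (sig.length + 1)).map (fun k =>
    (List.range (sig.length - k)).foldl
      (fun s j => s + sig.getD (k + j) 0 * sig.getD j 0) 0)

def auto_corel_all_alt (list_with_signals : List (List Int)) (mode_name : String) : List (List Int) :=
  if mode_name == "PFAK" then list_with_signals.map pvCorrCyc
  else if mode_name == "AFAK" then list_with_signals.map pvCorrLin
  else []

-- ===== PRECONDITION & SPEC =====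
-- Pre_ excludes only the inputs where A raises NameError: an unmatched mode with a nonempty signal list (`r` is never bound).
def Pre_auto_corel_all (list_with_signals : List (List Int)) (mode_name : String) : Prop :=
  mode_name = "PFAK" ∨ mode_name = "AFAK" ∨ list_with_signals = []
instance (list_with_signals : List (List Int)) (mode_name : String) : Decidable (Pre_auto_corel_all list_with_signals mode_name) := by unfold Pre_auto_corel_all; infer_instance

def pvWitness_auto_corel_all : List (List Int) × String := ([[1, -1, 2]], "PFAK")

def Spec_auto_corel_all (list_with_signals : List (List Int)) (mode_name : String) (out : List (List Int)) : Prop := out = auto_corel_all_alt list_with_signals mode_name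
instance (list_with_signals : List (List Int)) (mode_name : String) (out : List (List Int)) : Decidable (Spec_auto_corel_all list_with_signals mode_name out) := by unfold Spec_auto_corel_all; infer_instance

-- ===== CLAIM (what is proved, stated in full; the proofs are below) =====
def Claim_equal_auto_corel_all : Prop := ∀ (list_with_signals : List (List Int)) (mode_name : String), Dom_auto_corel_all list_with_signals mode_name → Pre_auto_corel_all list_with_signals mode_name → Spec_auto_corel_all list_with_signals mode_name (auto_corel_all list_with_signals mode_name)

-- ===== LEMMAS AND PROOFS =====

theorem pv_foldl_range_add (f : Nat → Int) (n : Nat) (a : Int) :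
    (List.range n).foldl (fun s i => s + f i) a = a + ∑ i ∈ Finset.range n, f i := by
  induction n with
  | zero => simp
  | succ n ih => simp [List.range_succ, Finset.sum_range_succ, ih, add_assoc]

theorem pv_calc_eq_sum (s1 s2 : List Int) :
    pvCalcCoef s1 s2 = ∑ i ∈ Finset.range s1.length, s1.getD i 0 * s2.getD i 0 := by
  simpa using pv_foldl_range_add (fun i => s1.getD i 0 * s2.getD i 0) s1.length 0

theorem pv_loop_shape (src t0 acc : List Int)
    (step : List Int × List Int → Nat → List Int × List Int) (g : List Int → List Int)
    (hg : ∀ st j, step st j = (g st.1, st.2 ++ [pvCalcCoef src (g st.1)])) (n : Nat) :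
    (List.range n).foldl step (t0, acc)
      = (g^[n] t0, acc ++ (List.range n).map (fun j => pvCalcCoef src (g^[j+1] t0))) := by
  induction n with
  | zero => simp
  | succ n ih =>
    rw [List.range_succ, List.foldl_append]
    simp only [List.foldl_cons, List.foldl_nil, ih, hg]
    simp [Function.iterate_succ_apply', List.append_assoc]

theorem pv_cyc1 (l : List Int) : pvCyclicShiftRight l 1 = l.getLast?.getD 0 :: l.dropLast := by
  simp [pvCyclicShiftRight, List.range_succ]

theorem pv_sh1 (l : List Int) : pvShiftRight l 1 = (0 :: l).dropLast := by
  simp [pvShiftRight, List.range_succ]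

theorem pv_cycIter_length (l : List Int) (k : Nat) (hk : k ≤ l.length) :
    ((fun m => pvCyclicShiftRight m 1)^[k] l).length = l.length := by
  induction k with
  | zero => simp
  | succ k ih =>
    have hk' : k ≤ l.length := Nat.le_of_succ_le hk
    have hN : 0 < l.length := Nat.lt_of_lt_of_le (Nat.succ_pos k) hk
    rw [Function.iterate_succ_apply', pv_cyc1]
    simp only [List.length_cons, List.length_dropLast, ih hk']
    omega

theorem pv_cycIter_getD (l : List Int) (k : Nat) (hk : k ≤ l.length) :
    ∀ i < l.length, ((fun m => pvCyclicShiftRight m 1)^[k] l).getD i 0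
      = l.getD ((i + l.length - k) % l.length) 0 := by
  induction k with
  | zero =>
    intro i hi
    simp [Nat.add_mod_right, Nat.mod_eq_of_lt hi]
  | succ k ih =>
    intro i hi
    have hk' : k ≤ l.length := Nat.le_of_succ_le hk
    have hN : 0 < l.length := Nat.lt_of_lt_of_le (Nat.succ_pos k) hk
    set m := (fun m => pvCyclicShiftRight m 1)^[k] l with hm
    have hlen : m.length = l.length := pv_cycIter_length l k hk'
    rw [Function.iterate_succ_apply', ← hm, pv_cyc1]
    match i with
    | 0 =>
      have hml : m.getLast? = m[m.length - 1]? := List.getLast?_eq_getElem?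
      have h1 : (m.getLast?.getD 0 :: m.dropLast).getD 0 0 = m.getD (m.length - 1) 0 := by
        simp [List.getD_eq_getElem?_getD, hml]
      rw [h1, hlen, ih hk' (l.length - 1) (by omega)]
      have harg : l.length - 1 + l.length - k = (0 + l.length - (k + 1)) + l.length := by omega
      rw [harg, Nat.add_mod_right]
    | j + 1 =>
      have hj : j < l.length - 1 := by omega
      have h1 : (m.getLast?.getD 0 :: m.dropLast).getD (j + 1) 0 = m.dropLast.getD j 0 := by
        simp [List.getD_eq_getElem?_getD]
      have h2 : m.dropLast.getD j 0 = m.getD j 0 := by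
        rw [List.getD_eq_getElem?_getD, List.getD_eq_getElem?_getD, List.getElem?_dropLast,
          if_pos (show j < m.length - 1 by rw [hlen]; exact hj)]
      rw [h1, h2, ih hk' j (by omega)]
      have harg : j + l.length - k = j + 1 + l.length - (k + 1) := by omega
      rw [harg]

theorem pv_shIter_length (l : List Int) (k : Nat) :
    ((fun m => pvShiftRight m 1)^[k] l).length = l.length := by
  induction k with
  | zero => simp
  | succ k ih =>
    rw [Function.iterate_succ_apply', pv_sh1]
    simp [ih]

theorem pv_shIter_getD (l : List Int) (k : Nat) :
    ∀ i < l.length, ((fun m => pvShiftRight m 1)^[k] l).getD i 0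
      = if i < k then 0 else l.getD (i - k) 0 := by
  induction k with
  | zero => intro i hi; simp
  | succ k ih =>
    intro i hi
    set m := (fun m => pvShiftRight m 1)^[k] l with hm
    have hlen : m.length = l.length := pv_shIter_length l k
    rw [Function.iterate_succ_apply', ← hm, pv_sh1]
    have h1 : ((0 :: m).dropLast).getD i 0 = (0 :: m).getD i 0 := by
      rw [List.getD_eq_getElem?_getD, List.getD_eq_getElem?_getD, List.getElem?_dropLast]
      have : i < (0 :: m).length - 1 := by simp [hlen]; omega
      rw [if_pos this]
    rw [h1]
    match i with
    | 0 => simp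
    | j + 1 =>
      have h2 : (0 :: m).getD (j + 1) 0 = m.getD j 0 := by
        simp [List.getD_eq_getElem?_getD]
      rw [h2, ih j (by omega)]
      by_cases hjk : j < k
      · simp [hjk, Nat.succ_lt_succ hjk]
      · have : ¬ (j + 1 < k + 1) := by omega
        simp [hjk, this]

theorem pv_entryCyc (sig : List Int) (k : Nat) (hk : k ≤ sig.length) :
    pvCalcCoef sig ((fun m => pvCyclicShiftRight m 1)^[k] sig)
      = (List.range sig.length).foldl
          (fun s i => s + sig.getD i 0 * sig.getD ((i + sig.length - k) % sig.length) 0) 0 := by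
  rw [pv_calc_eq_sum, pv_foldl_range_add, zero_add]
  refine Finset.sum_congr rfl (fun i hiM => ?_)
  have hi : i < sig.length := Finset.mem_range.mp hiM
  rw [pv_cycIter_getD sig k hk i hi]

theorem pv_entryLin (sig : List Int) (k : Nat) (hk : k ≤ sig.length) :
    pvCalcCoef sig ((fun m => pvShiftRight m 1)^[k] sig)
      = (List.range (sig.length - k)).foldl
          (fun s j => s + sig.getD (k + j) 0 * sig.getD j 0) 0 := by
  rw [pv_calc_eq_sum, pv_foldl_range_add, zero_add]
  have hterm : ∀ i ∈ Finset.range sig.length,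
      sig.getD i 0 * ((fun m => pvShiftRight m 1)^[k] sig).getD i 0
        = if i < k then 0 else sig.getD i 0 * sig.getD (i - k) 0 := by
    intro i hiM
    have hi : i < sig.length := Finset.mem_range.mp hiM
    rw [pv_shIter_getD sig k i hi]
    by_cases h : i < k <;> simp [h]
  rw [Finset.sum_congr rfl hterm]
  conv_lhs => rw [Finset.range_eq_Ico]
  rw [← Finset.sum_Ico_consecutive _ (Nat.zero_le k) hk]
  have h0 : (∑ i ∈ Finset.Ico 0 k, if i < k then (0 : Int) else sig.getD i 0 * sig.getD (i - k) 0) = 0 := by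
    refine Finset.sum_eq_zero (fun i hiM => ?_)
    have : i < k := (Finset.mem_Ico.mp hiM).2
    simp [this]
  rw [h0, zero_add, Finset.sum_Ico_eq_sum_range]
  refine Finset.sum_congr rfl (fun j _ => ?_)
  have : ¬ (k + j < k) := by omega
  simp [this]

theorem pv_cyc_sig (sig : List Int) : pvGetCorellation sig sig false = pvCorrCyc sig := by
  simp only [pvGetCorellation]
  rw [pv_loop_shape sig sig [pvCalcCoef sig sig] _ (fun m => pvCyclicShiftRight m 1)
    (by intro st j; simp)]
  unfold pvCorrCyc
  rw [List.range_succ_eq_map, List.map_cons, List.map_map]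
  have h0 : pvCalcCoef sig sig
      = (List.range sig.length).foldl
          (fun s i => s + sig.getD i 0 * sig.getD ((i + sig.length - 0) % sig.length) 0) 0 := by
    simpa using pv_entryCyc sig 0 (Nat.zero_le _)
  rw [List.singleton_append]
  refine congrArg₂ _ h0 (List.map_congr_left (fun j hj => ?_))
  have hj' : j < sig.length := List.mem_range.mp hj
  simpa using pv_entryCyc sig (j + 1) (by omega)

theorem pv_lin_sig (sig : List Int) : pvGetCorellation sig sig true = pvCorrLin sig := by
  simp only [pvGetCorellation]
  rw [pv_loop_shape sig sig [pvCalcCoef sig sig] _ (fun m => pvShiftRight m 1)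
    (by intro st j; simp)]
  unfold pvCorrLin
  rw [List.range_succ_eq_map, List.map_cons, List.map_map]
  have h0 : pvCalcCoef sig sig
      = (List.range (sig.length - 0)).foldl
          (fun s j => s + sig.getD (0 + j) 0 * sig.getD j 0) 0 := by
    simpa using pv_entryLin sig 0 (Nat.zero_le _)
  rw [List.singleton_append]
  refine congrArg₂ _ (by simpa using h0) (List.map_congr_left (fun j hj => ?_))
  have hj' : j < sig.length := List.mem_range.mp hj
  simpa using pv_entryLin sig (j + 1) (by omega)

theorem pv_outer_shape
    (step : List (List Int) × Option (List Int) → List Int → List (List Int) × Option (List Int))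
    (F : List Int → List Int)
    (hstep : ∀ st item, step st item = (st.1 ++ [F item], some (F item))) :
    ∀ (sigs : List (List Int)) (acc : List (List Int)) (r0 : Option (List Int)),
      (sigs.foldl step (acc, r0)).1 = acc ++ sigs.map F := by
  intro sigs
  induction sigs with
  | nil => intro acc r0; simp
  | cons item rest ih =>
    intro acc r0
    rw [List.foldl_cons, hstep, ih]
    simp

-- ===== VERDICT (by name: the statement is the Claim_ definition above) =====
theorem auto_corel_all_spec : Claim_equal_auto_corel_all := by
  intro sigs mode _ hpre
  unfold Spec_auto_corel_all auto_corel_all auto_corel_all_alt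
  rcases hpre with h | h | h
  · subst h
    rw [show (("PFAK" : String) == "PFAK") = true from rfl,
      show (("PFAK" : String) == "AFAK") = false from rfl]
    simp only [Bool.false_eq_true, if_true, if_false, Option.getD_some]
    exact pv_outer_shape _ pvCorrCyc (fun st item => by simp [pv_cyc_sig]) sigs [] none
  · subst h
    rw [show (("AFAK" : String) == "PFAK") = false from rfl,
      show (("AFAK" : String) == "AFAK") = true from rfl]
    simp only [Bool.false_eq_true, if_true, if_false, Option.getD_some]
    exact pv_outer_shape _ pvCorrLin (fun st item => by simp [pv_lin_sig]) sigs [] none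
  · subst h
    simp
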